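-- pv_equiv track=rewrite | github.com/daniel-reich/ubiquitous-fiesta | CMqa7tAtffudQ7hs4_9.py | sorting_steps
-- ===== SOURCE A (Python) =====
-- def sorting_steps(lst):
--   temp_lst = [x for x in lst]
--   result = []
--   while temp_lst != sorted(temp_lst):
--     for i in range(len(temp_lst)-1):
--       if temp_lst[i] > temp_lst[i+1]:
--         temp_lst[i], temp_lst[i+1] = temp_lst[i+1], temp_lst[i]
--         result.append([i, i+1])
--         break
--   return result
-- ===== SOURCE B (Python) =====
-- def sorting_steps(lst):
--     a = list(lst)
--     res = []
--     i, n = 0, len(a)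
--     while i < n - 1:
--         if a[i] <= a[i + 1]:
--             i += 1
--         else:
--             a[i], a[i + 1] = a[i + 1], a[i]
--             res.append([i, i + 1])
--             if i:
--                 i -= 1
--     return res
-- ===== Notes on version B (the rewrite author's own statement) =====
-- stated objective: faster
-- what changed: Replaces the re-sort-and-rescan-per-swap loop (each iteration calls sorted() and rescans from the left) with a single-pointer gnome-sort walk that steps back one position after a swap, so no list is ever re-sorted or rescanned.
import Mathlib
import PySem

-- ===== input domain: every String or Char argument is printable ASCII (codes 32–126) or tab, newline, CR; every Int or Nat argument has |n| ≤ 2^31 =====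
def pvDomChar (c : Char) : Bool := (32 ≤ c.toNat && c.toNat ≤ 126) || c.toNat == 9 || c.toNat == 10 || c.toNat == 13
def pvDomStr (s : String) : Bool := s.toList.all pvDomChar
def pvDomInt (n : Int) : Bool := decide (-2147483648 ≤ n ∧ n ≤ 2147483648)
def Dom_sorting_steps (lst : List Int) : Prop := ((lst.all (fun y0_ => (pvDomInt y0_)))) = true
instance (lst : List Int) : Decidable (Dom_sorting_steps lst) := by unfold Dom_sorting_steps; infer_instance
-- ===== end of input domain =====

-- B replaces A's re-sort-and-rescan-per-swap loop with a gnome-sort single pointer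
-- that steps back one position after each recorded swap (objective: faster).

-- ===== PORT A =====
-- number of inversions of a list (termination measure for both loops; not part of either algorithm's output)
def invCount : List Int → Nat
  | [] => 0
  | x :: r => r.countP (fun y => decide (y < x)) + invCount r

-- A's inner for-loop: scan for the first adjacent inversion; return its index and the list with that pair swapped
def aStep : List Int → Option (Nat × List Int)
  | x :: y :: r =>
      if x > y then some (0, y :: x :: r)
      else (aStep (y :: r)).map (fun p => (p.1 + 1, x :: p.2))
  | _ => none

theorem aStep_perm : ∀ (a a' : List Int) (i : Nat), aStep a = some (i, a') → a'.Perm a := by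
  intro a
  induction a with
  | nil => intro a' i h; simp [aStep] at h
  | cons x r ih =>
    intro a' i h
    match r with
    | [] => simp [aStep] at h
    | y :: r' =>
      by_cases hxy : x > y
      · simp [aStep, hxy] at h
        obtain ⟨_, rfl⟩ := h
        exact List.Perm.swap x y r'
      · simp [aStep, hxy] at h
        obtain ⟨k, b, hb, hk, rfl⟩ := h
        exact (ih b k hb).cons x

theorem aStep_inv : ∀ (a a' : List Int) (i : Nat), aStep a = some (i, a') → invCount a' + 1 = invCount a := by
  intro a
  induction a with
  | nil => intro a' i h; simp [aStep] at h
  | cons x r ih =>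
    intro a' i h
    match r with
    | [] => simp [aStep] at h
    | y :: r' =>
      by_cases hxy : x > y
      · simp [aStep, hxy] at h
        obtain ⟨_, rfl⟩ := h
        have h1 : decide (y < x) = true := by simpa using hxy
        have h2 : decide (x < y) = false := by simp; omega
        simp [invCount, h1, h2]
        omega
      · simp [aStep, hxy] at h
        obtain ⟨k, b, hb, hk, rfl⟩ := h
        have hperm := aStep_perm _ _ _ hb
        have hcnt : b.countP (fun z => decide (z < x)) = (y :: r').countP (fun z => decide (z < x)) :=
          hperm.countP_eq _
        have := ih b k hb
        simp [invCount, hcnt] at *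
        omega

-- A's while loop: while the list differs from its sorted copy, swap the leftmost adjacent
-- inversion and record it.  The `none` branch is unreachable (an unsorted list always has
-- an adjacent inversion; Python would loop forever there).
def pvALoop (a : List Int) : List (List Int) :=
  if a ≠ PySem.List.sorted a (fun x => x) false then
    match h : aStep a with
    | some (i, a') => [(i : Int), (i : Int) + 1] :: pvALoop a'
    | none => []
  else []
termination_by invCount a
decreasing_by
  have := aStep_inv a a' i h
  omega

def sorting_steps (lst : List Int) : List (List Int) :=
  pvALoop lst

-- ===== PORT B =====
-- swap the elements at positions i and i+1 (Python's tuple swap; no-op if i+1 is out of range)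
def pvSwap : List Int → Nat → List Int
  | x :: y :: r, 0 => y :: x :: r
  | x :: r, k + 1 => x :: pvSwap r k
  | a, _ => a

theorem pvSwap_perm : ∀ (a : List Int) (i : Nat), (pvSwap a i).Perm a := by
  intro a
  induction a with
  | nil => intro i; cases i <;> simp [pvSwap]
  | cons x r ih =>
    intro i
    match i, r with
    | 0, [] => simp [pvSwap]
    | 0, y :: r' => simpa [pvSwap] using List.Perm.swap x y r'
    | k + 1, r => simpa [pvSwap] using (ih k).cons x

theorem pvSwap_length (a : List Int) (i : Nat) : (pvSwap a i).length = a.length :=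
  (pvSwap_perm a i).length_eq

theorem pvSwap_inv : ∀ (a : List Int) (i : Nat), i + 1 < a.length →
    a.getD (i + 1) 0 < a.getD i 0 → invCount (pvSwap a i) + 1 = invCount a := by
  intro a
  induction a with
  | nil => intro i h; simp at h
  | cons x r ih =>
    intro i h hlt
    match i, r with
    | 0, y :: r' =>
      simp [List.getD] at hlt
      have h1 : decide (y < x) = true := by simpa using hlt
      have h2 : decide (x < y) = false := by simp; omega
      simp [pvSwap, invCount, h1, h2]
      omega
    | k + 1, r =>
      simp only [List.length_cons] at h
      simp [List.getD] at hlt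
      have hcnt : (pvSwap r k).countP (fun z => decide (z < x)) = r.countP (fun z => decide (z < x)) :=
        (pvSwap_perm r k).countP_eq _
      have := ih k (by omega) (by simpa [List.getD] using hlt)
      simp [pvSwap, invCount, hcnt]
      omega

-- B's while loop: gnome-sort pointer walk
def pvGLoop (a : List Int) (i : Nat) : List (List Int) :=
  if h : i < a.length - 1 then
    if a.getD i 0 ≤ a.getD (i + 1) 0 then pvGLoop a (i + 1)
    else [(i : Int), (i : Int) + 1] :: pvGLoop (pvSwap a i) (if 0 < i then i - 1 else i)
  else []
termination_by 2 * invCount a + (a.length - 1 - i)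
decreasing_by
  · omega
  · have hlen := pvSwap_length a i
    have hinv := pvSwap_inv a i (by omega) (by omega)
    split <;> omega

def sorting_steps_alt (lst : List Int) : List (List Int) :=
  pvGLoop lst 0

-- ===== PRECONDITION & SPEC =====
def Spec_sorting_steps (lst : List Int) (out : List (List Int)) : Prop := out = sorting_steps_alt lst
instance (lst : List Int) (out : List (List Int)) : Decidable (Spec_sorting_steps lst out) := by unfold Spec_sorting_steps; infer_instance

-- ===== CLAIM (what is proved, stated in full; the proofs are below) =====
def Claim_equal_sorting_steps : Prop := ∀ (lst : List Int), Dom_sorting_steps lst → Spec_sorting_steps lst (sorting_steps lst)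

-- ===== LEMMAS AND PROOFS =====

-- a list all of whose adjacent pairs are ordered is a chain
theorem isChain_of_adj : ∀ (a : List Int),
    (∀ j, j + 1 < a.length → a.getD j 0 ≤ a.getD (j + 1) 0) → List.IsChain (· ≤ ·) a := by
  intro a
  induction a with
  | nil => intro _; exact List.isChain_nil
  | cons x r ih =>
    intro h
    rw [List.isChain_cons]
    refine ⟨?_, ih (fun j hj => by simpa [List.getD] using h (j + 1) (by simpa using hj))⟩
    intro y hy
    match r, hy with
    | y' :: r', hy =>
      simp at hy
      subst hy
      simpa [List.getD] using h 0 (by simp)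

-- a list equal to its own sorted copy has its adjacent pairs ordered
theorem getD_le_of_eq_sorted (a : List Int) (hs : a = PySem.List.sorted a (fun x => x) false)
    (j : Nat) (hj : j + 1 < a.length) : a.getD j 0 ≤ a.getD (j + 1) 0 := by
  have hp : a.Pairwise (· ≤ ·) := by
    have := PySem.List.sorted_pairwise (xs := a) (key := fun x => x)
    rw [← hs] at this
    exact this.imp (fun h => h)
  rw [List.getD_eq_getElem a 0 (by omega), List.getD_eq_getElem a 0 hj]
  exact List.pairwise_iff_getElem.mp hp j (j + 1) (by omega) hj (by omega)

-- aStep finds the leftmost adjacent inversion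
theorem aStep_eq_some : ∀ (a : List Int) (i : Nat),
    (∀ j, j < i → j + 1 < a.length → a.getD j 0 ≤ a.getD (j + 1) 0) →
    i + 1 < a.length → a.getD (i + 1) 0 < a.getD i 0 →
    aStep a = some (i, pvSwap a i) := by
  intro a
  induction a with
  | nil => intro i _ h; simp at h
  | cons x r ih =>
    intro i hpre h hlt
    match i, r with
    | 0, y :: r' =>
      simp [List.getD] at hlt
      simp [aStep, pvSwap, hlt]
    | k + 1, y :: r' =>
      have h0 : x ≤ y := by
        simpa [List.getD] using hpre 0 (by omega) (by simp only [List.length_cons] at h ⊢; omega)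
      have hrec := ih k (fun j hj hj' => by
          simpa [List.getD] using hpre (j + 1) (by omega) (by simp only [List.length_cons] at hj' ⊢; omega))
        (by simp only [List.length_cons] at h ⊢; omega) (by simpa [List.getD] using hlt)
      have hne : ¬ x > y := by omega
      simp [aStep, hne, hrec, pvSwap]

-- positions strictly below i are unchanged by the swap at i
theorem getD_pvSwap_lt : ∀ (a : List Int) (i j : Nat), j < i →
    (pvSwap a i).getD j 0 = a.getD j 0 := by
  intro a
  induction a with
  | nil => intro i j h; cases i <;> simp [pvSwap]
  | cons x r ih =>
    intro i j h
    match i with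
    | 0 => omega
    | k + 1 =>
      cases r with
      | nil => cases j <;> simp [pvSwap, List.getD]
      | cons y r' =>
        cases j with
        | zero => simp [pvSwap, List.getD]
        | succ m => simpa [pvSwap, List.getD] using ih k m (by omega)

-- main invariant: if the pairs strictly left of the pointer are ordered,
-- the gnome walk from i produces exactly A's leftmost-inversion record list
theorem main_lemma : ∀ (N : Nat) (a : List Int) (i : Nat),
    2 * invCount a + (a.length - 1 - i) < N →
    (∀ j, j < i → j + 1 < a.length → a.getD j 0 ≤ a.getD (j + 1) 0) →
    pvGLoop a i = pvALoop a := by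
  intro N
  induction N with
  | zero => intro a i h; exact absurd h (Nat.not_lt_zero _)
  | succ N ih =>
    intro a i hm hpre
    by_cases hi : i < a.length - 1
    · by_cases hle : a.getD i 0 ≤ a.getD (i + 1) 0
      · rw [pvGLoop, dif_pos hi, if_pos hle]
        exact ih a (i + 1) (by omega)
          (fun j hj hj' => by
            rcases Nat.lt_succ_iff_lt_or_eq.mp hj with h' | h'
            · exact hpre j h' hj'
            · subst h'; exact hle)
      · have hlt : a.getD (i + 1) 0 < a.getD i 0 := by omega
        have hstep := aStep_eq_some a i hpre (by omega) hlt
        have hne : a ≠ PySem.List.sorted a (fun x => x) false := by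
          intro hs
          exact absurd (getD_le_of_eq_sorted a hs i (by omega)) (by omega)
        have hinv := pvSwap_inv a i (by omega) hlt
        have hlen := pvSwap_length a i
        have hA : pvALoop a = [(i : Int), (i : Int) + 1] :: pvALoop (pvSwap a i) := by
          rw [pvALoop, if_pos hne]
          split
          · rename_i i' a' heq
            rw [hstep] at heq
            injection heq with heq
            injection heq with h1 h2
            subst h1; subst h2; rfl
          · rename_i heq
            rw [hstep] at heq
            cases heq
        rw [pvGLoop, dif_pos hi, if_neg hle, hA]
        congr 1
        exact ih (pvSwap a i) (if 0 < i then i - 1 else i)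
          (by split <;> omega)
          (fun j hj hj' => by
            have hj2 : j + 1 < i := by split at hj <;> omega
            rw [getD_pvSwap_lt a i j (by omega), getD_pvSwap_lt a i (j + 1) hj2]
            exact hpre j (by omega) (by omega))
    · have hchain : List.IsChain (· ≤ ·) a :=
        isChain_of_adj a (fun j hj => hpre j (by omega) hj)
      have hpair : a.Pairwise (· ≤ ·) := List.isChain_iff_pairwise.mp hchain
      have hs : PySem.List.sorted a (fun x => x) false = a :=
        PySem.List.sorted_eq_self_of_pairwise a (fun x => x) (hpair.imp (fun h => h))
      rw [pvGLoop, dif_neg hi, pvALoop]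
      simp [hs]

-- ===== VERDICT (by name: the statement is the Claim_ definition above) =====
theorem sorting_steps_spec : Claim_equal_sorting_steps := by
  intro lst _
  unfold Spec_sorting_steps sorting_steps sorting_steps_alt
  exact (main_lemma (2 * invCount lst + lst.length + 1) lst 0 (by omega) (by omega)).symm
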